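-- pv_equiv track=rewrite | github.com/microsoft/qdk-chemistry | python/src/qdk_chemistry/algorithms/qubit_mapper/qdk_qubit_mapper.py | _bk_compute_children_indices
-- ===== SOURCE A (Python) =====
-- def _bk_compute_children_indices(j: int, n: int) -> frozenset[int]:
--     """Compute qubit indices for the imaginary component parity subset.
--
--     The flip set F(j) is used to partition the parity set when constructing
--     the Y-component of BK ladder operators. It identifies which parity qubits
--     contribute to the imaginary vs real components.
--
--     Reference: Seeley et al., J. Chem. Phys. 137, 224109 (2012), Eq. (19).
--
--     Args:
--         j: Spin-orbital index.
--         n: Size of the binary superset (must be a power of 2).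
--
--     Returns:
--         Frozenset of qubit indices in the flip (children) set.
--
--     """
--     if n % 2 != 0:
--         return frozenset()
--     half = n // 2
--     if j < half:
--         # Left half: recurse
--         return _bk_compute_children_indices(j, half)
--     if j < n - 1:
--         # Right half but not last: recurse with offset
--         return frozenset(i + half for i in _bk_compute_children_indices(j - half, half))
--     # Last element (j == n-1): recurse with offset and add n/2-1
--     return frozenset(i + half for i in _bk_compute_children_indices(j - half, half)) | frozenset({half - 1})
-- ===== SOURCE B (Python) =====
-- def _bk_compute_children_indices(j: int, n: int) -> frozenset:
--     """Iterative version: walk the binary halving with an accumulated offset."""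
--     result = []
--     off = 0
--     while n != 0 and n % 2 == 0:
--         half = n // 2
--         if j >= half:
--             if j >= n - 1:
--                 result = [off + half - 1] + result
--             off += half
--             j -= half
--         n = half
--     return frozenset(result)
-- ===== Notes on version B (the rewrite author's own statement) =====
-- stated objective: alternative
-- what changed: Replaced the recursive halving (which rebuilds a frozenset with an offset comprehension at every level) by a single iterative while-loop over the same binary halving that keeps an accumulated offset and prepends each offset sentinel to one result list.
import Mathlib
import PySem

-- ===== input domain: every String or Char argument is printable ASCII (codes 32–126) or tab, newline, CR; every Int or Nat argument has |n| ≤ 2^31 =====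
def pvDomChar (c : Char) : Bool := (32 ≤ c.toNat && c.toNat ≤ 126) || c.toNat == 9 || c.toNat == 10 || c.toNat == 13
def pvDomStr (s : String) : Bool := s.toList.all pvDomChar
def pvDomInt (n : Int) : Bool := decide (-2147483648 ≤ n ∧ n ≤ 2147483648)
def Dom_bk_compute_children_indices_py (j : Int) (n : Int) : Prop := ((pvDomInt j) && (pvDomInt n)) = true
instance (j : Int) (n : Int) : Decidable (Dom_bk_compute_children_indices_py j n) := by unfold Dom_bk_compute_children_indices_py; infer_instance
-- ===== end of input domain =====

-- B replaces A's recursion (which rebuilds a frozenset at every level) by one iterative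
-- halving loop with an accumulated offset; equivalence proved on all inputs with n ≠ 0
-- (at n = 0 Python A recurses forever / raises RecursionError, while B returns frozenset()).


-- ===== PORT A =====
-- literal transliteration of A's recursion; the 'n = 0' guard only makes the Lean function
-- total (Python A recurses forever there; n = 0 is outside Pre_)
def bk_compute_children_indices_py (j : Int) (n : Int) : List Int :=
  if PySem.Int.mod n 2 ≠ 0 then []
  else if _hz : n = 0 then []
  else
    let half := PySem.Int.floordiv n 2
    if j < half then bk_compute_children_indices_py j half
    else if j < n - 1 then
      PySem.Set.ofList ((bk_compute_children_indices_py (j - half) half).map (· + half))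
    else
      PySem.Set.union
        (PySem.Set.ofList ((bk_compute_children_indices_py (j - half) half).map (· + half)))
        (PySem.Set.ofList [half - 1])
termination_by n.natAbs
decreasing_by all_goals
  · simp only [PySem.Int.floordiv_eq_ediv_of_pos (by omega : (0:Int) < 2),
      PySem.Int.mod_eq_emod_of_pos (by omega : (0:Int) < 2)] at *
    omega

-- ===== PORT B =====
-- the while-loop of Source B: state (j, n, off, result), result built by prepending
def bkAltLoop (j : Int) (n : Int) (off : Int) (res : List Int) : List Int :=
  if _h : ¬ (n ≠ 0 ∧ PySem.Int.mod n 2 = 0) then res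
  else
    let half := PySem.Int.floordiv n 2
    if half ≤ j then
      bkAltLoop (j - half) half (off + half)
        (if n - 1 ≤ j then (off + half - 1) :: res else res)
    else
      bkAltLoop j half off res
termination_by n.natAbs
decreasing_by all_goals
  · simp only [PySem.Int.floordiv_eq_ediv_of_pos (by omega : (0:Int) < 2),
      PySem.Int.mod_eq_emod_of_pos (by omega : (0:Int) < 2)] at *
    omega

def bk_compute_children_indices_py_alt (j : Int) (n : Int) : List Int :=
  PySem.Set.ofList (bkAltLoop j n 0 [])

-- ===== PRECONDITION & SPEC =====
-- Pre_ excludes only n = 0, where Python A recurses forever (RecursionError); B returns frozenset().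
def Pre_bk_compute_children_indices_py (j : Int) (n : Int) : Prop := n ≠ 0
instance (j : Int) (n : Int) : Decidable (Pre_bk_compute_children_indices_py j n) := by unfold Pre_bk_compute_children_indices_py; infer_instance
def pvWitness_bk_compute_children_indices_py : Int × Int := (3, 8)

def Spec_bk_compute_children_indices_py (j : Int) (n : Int) (out : List Int) : Prop := out = bk_compute_children_indices_py_alt j n
instance (j : Int) (n : Int) (out : List Int) : Decidable (Spec_bk_compute_children_indices_py j n out) := by unfold Spec_bk_compute_children_indices_py; infer_instance

-- ===== CLAIM (what is proved, stated in full; the proofs are below) =====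
def Claim_equal_bk_compute_children_indices_py : Prop := ∀ (j : Int) (n : Int), Dom_bk_compute_children_indices_py j n → Pre_bk_compute_children_indices_py j n → Spec_bk_compute_children_indices_py j n (bk_compute_children_indices_py j n)


-- ===== LEMMAS AND PROOFS =====

theorem set_union_singleton (m : List Int) (c : Int) (h : c ∉ m) (hnd : m.Nodup) :
    PySem.Set.union (PySem.Set.ofList m) (PySem.Set.ofList [c]) = m ++ [c] := by
  rw [PySem.Set.ofList_eq_self_of_nodup m hnd]
  simp [PySem.Set.union, PySem.Set.update, PySem.Set.ofList, PySem.Set.add, PySem.Set.empty, h]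

theorem bkA_bounds (j n : Int) : ∀ x ∈ bk_compute_children_indices_py j n,
    (0 < n → 0 ≤ x ∧ x ≤ n - 2) ∧ (n < 0 → x ≤ -2) := by
  induction j, n using bk_compute_children_indices_py.induct with
  | case1 j n hmod =>
    intro x hx; rw [bk_compute_children_indices_py, if_pos hmod] at hx; simp at hx
  | case2 j h =>
    intro x hx
    rw [bk_compute_children_indices_py, if_neg h, dif_pos rfl] at hx; simp at hx
  | case3 j n hmod hn half hlt ih =>
    have m2 := PySem.Int.mod_eq_emod_of_pos (a := n) (by omega : (0:Int) < 2)
    have e2 := PySem.Int.floordiv_eq_ediv_of_pos (a := n) (by omega : (0:Int) < 2)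
    have h2 : half = n / 2 := e2
    have hm : n % 2 = 0 := by rw [m2] at hmod; omega
    intro x hx
    rw [bk_compute_children_indices_py, if_neg hmod, dif_neg hn, if_pos hlt] at hx
    have hb := ih x hx
    rw [h2] at hb
    refine ⟨fun hs => ?_, fun hs => ?_⟩ <;> omega
  | case4 j n hmod hn half hge hlt ih =>
    have m2 := PySem.Int.mod_eq_emod_of_pos (a := n) (by omega : (0:Int) < 2)
    have e2 := PySem.Int.floordiv_eq_ediv_of_pos (a := n) (by omega : (0:Int) < 2)
    have h2 : half = n / 2 := e2
    have hm : n % 2 = 0 := by rw [m2] at hmod; omega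
    intro x hx
    rw [bk_compute_children_indices_py, if_neg hmod, dif_neg hn, if_neg hge, if_pos hlt,
      PySem.Set.mem_ofList] at hx
    simp only [List.mem_map] at hx
    obtain ⟨y, hy, rfl⟩ := hx
    have hb := ih y hy
    rw [h2] at hb
    rw [e2]
    refine ⟨fun hs => ?_, fun hs => ?_⟩ <;> omega
  | case5 j n hmod hn half hge hge2 ih =>
    have m2 := PySem.Int.mod_eq_emod_of_pos (a := n) (by omega : (0:Int) < 2)
    have e2 := PySem.Int.floordiv_eq_ediv_of_pos (a := n) (by omega : (0:Int) < 2)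
    have h2 : half = n / 2 := e2
    have hm : n % 2 = 0 := by rw [m2] at hmod; omega
    intro x hx
    rw [bk_compute_children_indices_py, if_neg hmod, dif_neg hn, if_neg hge, if_neg hge2] at hx
    have hx' : x ∈ (bk_compute_children_indices_py (j - PySem.Int.floordiv n 2)
        (PySem.Int.floordiv n 2)).map (· + PySem.Int.floordiv n 2) ∨
        x = PySem.Int.floordiv n 2 - 1 := by
      have hmem : x ∈ PySem.Set.update (PySem.Set.ofList
          ((bk_compute_children_indices_py (j - PySem.Int.floordiv n 2)
            (PySem.Int.floordiv n 2)).map (· + PySem.Int.floordiv n 2)))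
          [PySem.Int.floordiv n 2 - 1] := hx
      simp only [PySem.Set.update, List.foldl, PySem.Set.add] at hmem
      by_cases hc : (PySem.Set.ofList ((bk_compute_children_indices_py
          (j - PySem.Int.floordiv n 2) (PySem.Int.floordiv n 2)).map
          (· + PySem.Int.floordiv n 2))).contains (PySem.Int.floordiv n 2 - 1)
      · rw [if_pos hc] at hmem
        rw [PySem.Set.mem_ofList] at hmem
        exact .inl hmem
      · rw [if_neg hc, List.mem_append] at hmem
        rcases hmem with h | h
        · exact .inl ((PySem.Set.mem_ofList _ _).mp h)
        · rw [List.mem_singleton] at h; exact .inr h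
    rcases hx' with h | h
    · simp only [List.mem_map] at h
      obtain ⟨y, hy, rfl⟩ := h
      have hb := ih y hy
      rw [h2] at hb
      rw [e2]
      refine ⟨fun hs => ?_, fun hs => ?_⟩ <;> omega
    · rw [e2] at h
      refine ⟨fun hs => ?_, fun hs => ?_⟩ <;> omega

theorem bkA_sentinel_not_mem (j n : Int) (hn : n ≠ 0) (hm : PySem.Int.mod n 2 = 0) :
    (PySem.Int.floordiv n 2 - 1) ∉ (bk_compute_children_indices_py
      (j - PySem.Int.floordiv n 2) (PySem.Int.floordiv n 2)).map
      (· + PySem.Int.floordiv n 2) := by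
  have m2 := PySem.Int.mod_eq_emod_of_pos (a := n) (by omega : (0:Int) < 2)
  have e2 := PySem.Int.floordiv_eq_ediv_of_pos (a := n) (by omega : (0:Int) < 2)
  rw [m2] at hm
  intro h
  simp only [List.mem_map] at h
  obtain ⟨y, hy, hEq⟩ := h
  have hb := bkA_bounds _ _ y hy
  rw [e2] at hb hEq
  omega

theorem bkA_nodup (j n : Int) : (bk_compute_children_indices_py j n).Nodup := by
  induction j, n using bk_compute_children_indices_py.induct with
  | case1 j n hmod => rw [bk_compute_children_indices_py, if_pos hmod]; exact List.nodup_nil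
  | case2 j h => rw [bk_compute_children_indices_py, if_neg h, dif_pos rfl]; exact List.nodup_nil
  | case3 j n hmod hn half hlt ih =>
    rw [bk_compute_children_indices_py, if_neg hmod, dif_neg hn, if_pos hlt]; exact ih
  | case4 j n hmod hn half hge hlt ih =>
    rw [bk_compute_children_indices_py, if_neg hmod, dif_neg hn, if_neg hge, if_pos hlt]
    exact PySem.Set.nodup_ofList _
  | case5 j n hmod hn half hge hge2 ih =>
    rw [bk_compute_children_indices_py, if_neg hmod, dif_neg hn, if_neg hge, if_neg hge2]
    have hnd : ((bk_compute_children_indices_py (j - half) half).map (· + half)).Nodup :=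
      ih.map (fun a b hab => by omega)
    have hni := bkA_sentinel_not_mem j n hn (not_not.mp hmod)
    rw [set_union_singleton _ _ hni hnd]
    refine hnd.append (List.nodup_singleton _) ?_
    intro a ha hb
    rw [List.mem_singleton] at hb
    subst hb
    exact hni ha

theorem bkA_map_nodup (j n : Int) (c : Int) :
    ((bk_compute_children_indices_py j n).map (· + c)).Nodup :=
  (bkA_nodup j n).map (fun a b hab => by omega)

theorem bkAltLoop_eq (j n : Int) : ∀ (off : Int) (res : List Int),
    bkAltLoop j n off res = (bk_compute_children_indices_py j n).map (· + off) ++ res := by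
  induction j, n using bk_compute_children_indices_py.induct with
  | case1 j n hmod =>
    intro off res
    rw [bkAltLoop, dif_pos (fun h => hmod h.2),
      bk_compute_children_indices_py, if_pos hmod]
    simp
  | case2 j h =>
    intro off res
    rw [bkAltLoop, dif_pos (fun hc => hc.1 rfl),
      bk_compute_children_indices_py, if_neg h, dif_pos rfl]
    simp
  | case3 j n hmod hn half hlt ih =>
    intro off res
    rw [bk_compute_children_indices_py, if_neg hmod, dif_neg hn, if_pos hlt,
      bkAltLoop, dif_neg (not_not_intro ⟨hn, not_not.mp hmod⟩), if_neg (not_le.mpr hlt),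
      ih off res]
  | case4 j n hmod hn half hge hlt ih =>
    intro off res
    rw [bk_compute_children_indices_py, if_neg hmod, dif_neg hn, if_neg hge, if_pos hlt,
      bkAltLoop, dif_neg (not_not_intro ⟨hn, not_not.mp hmod⟩), if_pos (not_lt.mp hge),
      if_neg (not_le.mpr hlt), ih (off + half) res,
      PySem.Set.ofList_eq_self_of_nodup _ (bkA_map_nodup _ _ _), List.map_map]
    congr 1
    exact List.map_congr_left (fun a _ => by
      have h2 : half = n / 2 := PySem.Int.floordiv_eq_ediv_of_pos (by omega)
      simp only [Function.comp_apply]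
      omega)
  | case5 j n hmod hn half hge hge2 ih =>
    intro off res
    have hnd : ((bk_compute_children_indices_py (j - half) half).map (· + half)).Nodup :=
      bkA_map_nodup _ _ _
    have hni := bkA_sentinel_not_mem j n hn (not_not.mp hmod)
    rw [bk_compute_children_indices_py, if_neg hmod, dif_neg hn, if_neg hge, if_neg hge2,
      set_union_singleton _ _ hni hnd,
      bkAltLoop, dif_neg (not_not_intro ⟨hn, not_not.mp hmod⟩), if_pos (not_lt.mp hge),
      if_pos (by omega : n - 1 ≤ j), ih (off + half) ((off + half - 1) :: res),
      List.map_append, List.map_map]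
    simp only [List.map_cons, List.map_nil, List.append_assoc, List.singleton_append]
    congr 1
    · exact List.map_congr_left (fun a _ => by
        have h2 : half = n / 2 := PySem.Int.floordiv_eq_ediv_of_pos (by omega)
        simp only [Function.comp_apply]
        omega)
    · congr 1; ring

-- ===== VERDICT (by name: the statement is the Claim_ definition above) =====
theorem bk_compute_children_indices_py_spec : Claim_equal_bk_compute_children_indices_py := by
  intro j n _ _
  unfold Spec_bk_compute_children_indices_py bk_compute_children_indices_py_alt
  rw [bkAltLoop_eq]
  simp only [List.append_nil]
  have hid : (bk_compute_children_indices_py j n).map (· + 0) = bk_compute_children_indices_py j n := by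
    simp
  rw [hid, PySem.Set.ofList_eq_self_of_nodup _ (bkA_nodup j n)]
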